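-- pv_equiv track=rewrite | github.com/logicopslab/45DaysOfPython | 18.AdvancedConcepts/58_search_ranking.py | search
-- ===== SOURCE A (Python) =====
-- def calculate_score(text, query_words):
--     score = 0
--     words = text.lower().split()
--
--     for q in query_words:
--         score += words.count(q)
--
--     return score
--
-- def search(data, query):
--     query_words = query.lower().split()
--     results = []
--
--     for item in data:
--         score = calculate_score(item, query_words)
--
--         if score > 0:
--             results.append((item, score))
--
--     # Sort by score (highest first)
--     results.sort(key=lambda x: x[1], reverse=True)
--
--     return results
-- ===== SOURCE B (Python) =====
-- def search(data, query):
--     # Alternative decomposition: multiset of query words built once; each item scored in one pass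
--     # over its own words via dict lookups instead of per-query-word count scans.
--     qcount = {}
--     for q in query.lower().split():
--         qcount[q] = qcount.get(q, 0) + 1
--
--     results = []
--     for item in data:
--         score = sum(qcount.get(w, 0) for w in item.lower().split())
--         if score > 0:
--             results.append((item, score))
--
--     results.sort(key=lambda x: x[1], reverse=True)
--     return results
-- ===== Notes on version B (the rewrite author's own statement) =====
-- stated objective: alternative
-- what changed: B builds a word->multiplicity dict from the query once and scores each item in a single pass over the item's own words via dict lookups, instead of A's inner words.count scan per query word per item.
import Mathlib
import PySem

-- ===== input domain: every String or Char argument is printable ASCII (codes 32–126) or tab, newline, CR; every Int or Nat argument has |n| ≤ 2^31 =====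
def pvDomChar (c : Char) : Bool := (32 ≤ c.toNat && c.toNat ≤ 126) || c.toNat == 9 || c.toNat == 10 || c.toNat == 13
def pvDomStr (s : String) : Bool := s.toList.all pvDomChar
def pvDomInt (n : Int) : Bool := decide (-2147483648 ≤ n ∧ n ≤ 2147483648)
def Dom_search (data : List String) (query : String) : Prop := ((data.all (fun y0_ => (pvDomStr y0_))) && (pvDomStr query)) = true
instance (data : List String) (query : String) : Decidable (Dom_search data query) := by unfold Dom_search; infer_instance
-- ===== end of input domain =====

-- B builds a query-word multiplicity dict once and scores each item in one pass over its own words, instead of A's per-query-word count scans (alternative decomposition).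

-- ===== PORT A =====
def calculate_score (text : String) (query_words : List String) : Int :=
  let words := PySem.Str.split₀ (PySem.Str.lower text)
  query_words.foldl (fun score q => score + (PySem.List.count words q : Int)) 0

def search (data : List String) (query : String) : List (String × Int) :=
  let query_words := PySem.Str.split₀ (PySem.Str.lower query)
  let results := data.foldl (fun results item =>
    let score := calculate_score item query_words
    if score > 0 then results ++ [(item, score)] else results) []
  PySem.List.sorted results (fun x => x.2) true

-- ===== PORT B =====
def search_alt (data : List String) (query : String) : List (String × Int) :=
  let qcount : PySem.Dict String Int :=
    (PySem.Str.split₀ (PySem.Str.lower query)).foldl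
      (fun d q => d.insert q (d.getD q 0 + 1)) (PySem.Dict.empty : PySem.Dict String Int)
  let results := data.foldl (fun results item =>
    let score := (PySem.Str.split₀ (PySem.Str.lower item)).foldl
      (fun s w => s + qcount.getD w 0) 0
    if score > 0 then results ++ [(item, score)] else results) []
  PySem.List.sorted results (fun x => x.2) true

-- ===== PRECONDITION & SPEC =====
def Spec_search (data : List String) (query : String) (out : List (String × Int)) : Prop := out = search_alt data query
instance (data : List String) (query : String) (out : List (String × Int)) : Decidable (Spec_search data query out) := by unfold Spec_search; infer_instance

-- ===== CLAIM (what is proved, stated in full; the proofs are below) =====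
def Claim_equal_search : Prop := ∀ (data : List String) (query : String), Dom_search data query → Spec_search data query (search data query)

-- ===== LEMMAS AND PROOFS =====

theorem pv_sum_map_cast_add (f g : String → Nat) (W : List String) :
    (W.map (fun w => ((f w + g w : Nat) : Int))).sum
      = (W.map (fun w => (f w : Int))).sum + (W.map (fun w => (g w : Int))).sum := by
  induction W with
  | nil => simp
  | cons w W ih => simp only [List.map_cons, List.sum_cons, ih]; push_cast; ring

theorem pv_sum_indicator (q : String) (W : List String) :
    (W.map (fun w => ((if q == w then 1 else 0 : Nat) : Int))).sum = (W.count q : Int) := by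
  induction W with
  | nil => simp
  | cons w W ih =>
    simp only [List.map_cons, List.sum_cons, List.count_cons, ih]
    push_cast
    by_cases h : q = w
    · simp only [h, beq_self_eq_true, if_true]; omega
    · simp only [beq_iff_eq, h, Ne.symm h, if_false]; omega

-- double counting: Σ_{w∈W} count_Q(w) = Σ_{q∈Q} count_W(q)
theorem pv_double_count (Q W : List String) :
    (W.map (fun w => (Q.count w : Int))).sum = (Q.map (fun q => (W.count q : Int))).sum := by
  induction Q with
  | nil => simp
  | cons q Q ih =>
    simp only [List.map_cons, List.sum_cons, List.count_cons]
    rw [pv_sum_map_cast_add (fun w => Q.count w) (fun w => if q == w then 1 else 0) W,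
      ih, pv_sum_indicator]
    ring

theorem pv_score_eq (Q : List String) (text : String) :
    calculate_score text Q
      = (PySem.Str.split₀ (PySem.Str.lower text)).foldl
          (fun s w => s + (Q.foldl (fun d q => d.insert q (d.getD q 0 + 1)) (PySem.Dict.empty : PySem.Dict String Int)).getD w 0) 0 := by
  unfold calculate_score
  rw [PySem.Dict.foldl_insert_getD_add_one_eq_counter]
  simp only [PySem.List.foldl_add, PySem.Dict.getD_counter, zero_add]
  exact (pv_double_count Q (PySem.Str.split₀ (PySem.Str.lower text))).symm

theorem pv_fold_eq (data : List String) (query : String) :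
    data.foldl (fun results item =>
        let score := calculate_score item (PySem.Str.split₀ (PySem.Str.lower query))
        if score > 0 then results ++ [(item, score)] else results) []
      = data.foldl (fun results item =>
        let score := (PySem.Str.split₀ (PySem.Str.lower item)).foldl
          (fun s w => s + ((PySem.Str.split₀ (PySem.Str.lower query)).foldl
            (fun d q => d.insert q (d.getD q 0 + 1)) (PySem.Dict.empty : PySem.Dict String Int)).getD w 0) 0
        if score > 0 then results ++ [(item, score)] else results) [] := by
  have hfun : (fun (results : List (String × Int)) item =>
        let score := calculate_score item (PySem.Str.split₀ (PySem.Str.lower query))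
        if score > 0 then results ++ [(item, score)] else results)
      = (fun (results : List (String × Int)) item =>
        let score := (PySem.Str.split₀ (PySem.Str.lower item)).foldl
          (fun s w => s + ((PySem.Str.split₀ (PySem.Str.lower query)).foldl
            (fun d q => d.insert q (d.getD q 0 + 1)) (PySem.Dict.empty : PySem.Dict String Int)).getD w 0) 0
        if score > 0 then results ++ [(item, score)] else results) := by
    funext acc item
    simp only [pv_score_eq (PySem.Str.split₀ (PySem.Str.lower query)) item]
  rw [hfun]

-- ===== VERDICT (by name: the statement is the Claim_ definition above) =====
theorem search_spec : Claim_equal_search := by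
  intro data query _
  unfold Spec_search search search_alt
  exact congrArg (fun r => PySem.List.sorted r (fun x => x.2) true) (pv_fold_eq data query)
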